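-- pv_equiv track=rewrite | github.com/pbbcache/cachesim | simulator/common/simulator_core.py | get_partition_masks
-- ===== SOURCE A (Python) =====
-- def get_partition_masks(partition_sizes):
-- 	next_available_way=0
-- 	masks=[]
-- 	partition_sizes = list(map(int, partition_sizes))
-- 	for size in partition_sizes:
-- 		masks.append(hex(((1<<size)-1)<<next_available_way))
-- 		next_available_way=next_available_way+size
-- 	return masks
-- ===== SOURCE B (Python) =====
-- def get_partition_masks(partition_sizes):
--     def build(sizes, start):
--         if not sizes:
--             return []
--         end = start + sizes[0]
--         return [hex((1 << end) - (1 << start))] + build(sizes[1:], end)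
--     return build([int(s) for s in partition_sizes], 0)
-- ===== Notes on version B (the rewrite author's own statement) =====
-- stated objective: alternative
-- what changed: B recurses over the list carrying the partition's start boundary and computes each mask by the power-of-two difference (1<<end)-(1<<start), instead of A's iterative loop appending ((1<<size)-1)<<offset with a mutable running offset.
import Mathlib
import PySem

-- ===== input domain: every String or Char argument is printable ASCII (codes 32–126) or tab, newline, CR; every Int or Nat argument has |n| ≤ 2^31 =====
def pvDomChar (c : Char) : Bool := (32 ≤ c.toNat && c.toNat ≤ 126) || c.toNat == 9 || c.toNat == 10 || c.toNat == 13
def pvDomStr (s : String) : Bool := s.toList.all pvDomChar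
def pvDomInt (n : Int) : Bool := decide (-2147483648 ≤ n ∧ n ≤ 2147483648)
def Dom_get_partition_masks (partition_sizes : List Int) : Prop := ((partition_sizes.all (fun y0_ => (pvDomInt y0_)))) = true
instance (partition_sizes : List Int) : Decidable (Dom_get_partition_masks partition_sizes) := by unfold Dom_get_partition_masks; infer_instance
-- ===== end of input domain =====

-- B recurses over the list carrying the partition's start boundary and computes each mask
-- as the power-of-two difference (1<<end)-(1<<start), instead of A's loop threading a running
-- offset and appending ((1<<size)-1)<<offset; objective: alternative decomposition.

-- ===== PORT A =====
-- Python's hex digits for a positive Nat (most significant first), produced by division,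
-- appending the least-significant digit last. Exact for n ≥ 1.
def pvHexDigits (n : Nat) : List Char :=
  if h : n = 0 then [] else
    pvHexDigits (n / 16) ++ [(Nat.digitChar (n % 16))]
decreasing_by exact Nat.div_lt_self (Nat.pos_of_ne_zero h) (by norm_num)

-- Python hex(n): "0x…" lowercase, "-0x…" for negatives (negatives never reached under Pre_). Exact.
def pvHex (n : Int) : String :=
  if n < 0 then "-0x" ++ (if (-n).toNat = 0 then "0" else String.mk (pvHexDigits (-n).toNat))
  else "0x" ++ (if n.toNat = 0 then "0" else String.mk (pvHexDigits n.toNat))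

def get_partition_masks (partition_sizes : List Int) : List String :=
  -- shifts via toNat: Python raises ValueError on a negative shift count; excluded by Pre_.
  (partition_sizes.foldl
    (fun (st : List String × Int) size =>
      (st.1 ++ [pvHex ((((1 : Int) <<< size.toNat) - 1) <<< st.2.toNat)], st.2 + size))
    (([] : List String), (0 : Int))).1

-- ===== PORT B =====
-- B-side hex digits: tail-recursive, prepending digits into an accumulator.
def pvHexRev (n : Nat) (acc : List Char) : List Char :=
  if h : n = 0 then acc else pvHexRev (n / 16) (Nat.digitChar (n % 16) :: acc)
decreasing_by exact Nat.div_lt_self (Nat.pos_of_ne_zero h) (by norm_num)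

def pvHexB (n : Int) : String :=
  if n < 0 then "-0x" ++ (if (-n).toNat = 0 then "0" else String.mk (pvHexRev (-n).toNat []))
  else "0x" ++ (if n.toNat = 0 then "0" else String.mk (pvHexRev n.toNat []))

def pvBuild (sizes : List Int) (start : Int) : List String :=
  match sizes with
  | [] => []
  | s :: rest =>
    let «end» := start + s
    [pvHexB (((1 : Int) <<< «end».toNat) - ((1 : Int) <<< start.toNat))] ++ pvBuild rest «end»

def get_partition_masks_alt (partition_sizes : List Int) : List String :=
  pvBuild partition_sizes 0

-- ===== PRECONDITION & SPEC =====
-- Pre_: every size is ≥ 0 — Python's '<<' raises ValueError on a negative shift count.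
def Pre_get_partition_masks (partition_sizes : List Int) : Prop :=
  ∀ s ∈ partition_sizes, 0 ≤ s
instance (partition_sizes : List Int) : Decidable (Pre_get_partition_masks partition_sizes) := by
  unfold Pre_get_partition_masks; infer_instance

def pvWitness_get_partition_masks : List Int := [1, 2, 3]

def Spec_get_partition_masks (partition_sizes : List Int) (out : List String) : Prop := out = get_partition_masks_alt partition_sizes
instance (partition_sizes : List Int) (out : List String) : Decidable (Spec_get_partition_masks partition_sizes out) := by unfold Spec_get_partition_masks; infer_instance

-- ===== CLAIM (what is proved, stated in full; the proofs are below) =====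
def Claim_equal_get_partition_masks : Prop := ∀ (partition_sizes : List Int), Dom_get_partition_masks partition_sizes → Pre_get_partition_masks partition_sizes → Spec_get_partition_masks partition_sizes (get_partition_masks partition_sizes)

-- ===== LEMMAS AND PROOFS =====
-- The accumulator-style digit builder agrees with the append-style one.
theorem pvHexRev_eq (n : Nat) : ∀ acc, pvHexRev n acc = pvHexDigits n ++ acc := by
  induction n using Nat.strong_induction_on with
  | _ n ih =>
    intro acc
    rw [pvHexRev, pvHexDigits]
    by_cases h : n = 0
    · simp [h]
    · simp [h, ih (n / 16) (Nat.div_lt_self (Nat.pos_of_ne_zero h) (by norm_num))]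

theorem pvHexB_eq (n : Int) : pvHexB n = pvHex n := by
  unfold pvHexB pvHex
  split_ifs <;> simp [pvHexRev_eq]

-- ((1<<s)-1)<<off = (1<<(off+s)) - (1<<off) for s, off ≥ 0.
-- Loop/recursion correspondence.
theorem pv_loop_eq (xs : List Int) : ∀ (acc : List String) (off : Int), 0 ≤ off →
    (∀ s ∈ xs, 0 ≤ s) →
    (xs.foldl
      (fun (st : List String × Int) size =>
        (st.1 ++ [pvHex ((((1 : Int) <<< size.toNat) - 1) <<< st.2.toNat)], st.2 + size))
      (acc, off)).1 = acc ++ pvBuild xs off := by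
  induction xs with
  | nil => intro acc off _ _; simp [pvBuild]
  | cons x xs ih =>
    intro acc off ho hall
    have hx : 0 ≤ x := hall x (List.mem_cons_self ..)
    have hrest : ∀ s ∈ xs, 0 ≤ s := fun s hs => hall s (List.mem_cons_of_mem _ hs)
    simp only [List.foldl_cons, pvBuild]
    -- ((1<<end)-(1<<start)) = ((1<<size)-1)<<start, both sides as they elaborate in the ports
    have e1 : ((1 : ℤ) <<< (off + x).toNat - (1 : ℤ) <<< off.toNat)
        = ((1 : ℤ) <<< ((x.toNat : ℕ) : ℤ) - 1) <<< off.toNat := by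
      simp only [Int.one_shiftLeft, Int.shiftLeft_eq, Int.toNat_add ho hx]
      push_cast
      ring
    rw [ih _ (off + x) (by omega) hrest, pvHexB_eq, e1]
    simp only [List.append_assoc, List.singleton_append]

-- ===== VERDICT (by name: the statement is the Claim_ definition above) =====
theorem get_partition_masks_spec : Claim_equal_get_partition_masks := by
  intro xs _ hpre
  unfold Spec_get_partition_masks get_partition_masks get_partition_masks_alt
  rw [pv_loop_eq xs [] 0 le_rfl hpre]
  simp
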